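-- pv_equiv track=rewrite | github.com/usm-ricardoroche/pisces | scripts/rate-edit-tool.py | summarize_todo_state
-- ===== SOURCE A (Python) =====
-- def summarize_todo_state(order: list[str], items: dict[str, tuple[str, str]]) -> tuple[int, int, str | None]:
--     if not order:
--         return 0, 0, None
--     completed = 0
--     current: str | None = None
--     for task_id in order:
--         content, status = items.get(task_id, ("", "pending"))
--         if status == "completed":
--             completed += 1
--         elif current is None and status == "in_progress":
--             current = content
--     if current is None:
--         for task_id in order:
--             content, status = items.get(task_id, ("", "pending"))
--             if status == "pending":
--                 current = content
--                 break
--     return completed, len(order), current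
-- ===== SOURCE B (Python) =====
-- def summarize_todo_state(order: list[str], items: dict[str, tuple[str, str]]) -> tuple[int, int, str | None]:
--     completed = 0
--     first_in_progress: str | None = None
--     first_pending: str | None = None
--     for task_id in order:
--         content, status = items.get(task_id, ("", "pending"))
--         if status == "completed":
--             completed += 1
--         elif status == "in_progress":
--             if first_in_progress is None:
--                 first_in_progress = content
--         elif status == "pending":
--             if first_pending is None:
--                 first_pending = content
--     current = first_in_progress if first_in_progress is not None else first_pending
--     return completed, len(order), current
-- ===== Notes on version B (the rewrite author's own statement) =====
-- stated objective: simpler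
-- what changed: Replaces A's two dependent scans (count/in_progress pass, then a conditional second pass for the first pending task) with a single pass that tracks the completed count, the first in_progress content and the first pending content at once.
import Mathlib
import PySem

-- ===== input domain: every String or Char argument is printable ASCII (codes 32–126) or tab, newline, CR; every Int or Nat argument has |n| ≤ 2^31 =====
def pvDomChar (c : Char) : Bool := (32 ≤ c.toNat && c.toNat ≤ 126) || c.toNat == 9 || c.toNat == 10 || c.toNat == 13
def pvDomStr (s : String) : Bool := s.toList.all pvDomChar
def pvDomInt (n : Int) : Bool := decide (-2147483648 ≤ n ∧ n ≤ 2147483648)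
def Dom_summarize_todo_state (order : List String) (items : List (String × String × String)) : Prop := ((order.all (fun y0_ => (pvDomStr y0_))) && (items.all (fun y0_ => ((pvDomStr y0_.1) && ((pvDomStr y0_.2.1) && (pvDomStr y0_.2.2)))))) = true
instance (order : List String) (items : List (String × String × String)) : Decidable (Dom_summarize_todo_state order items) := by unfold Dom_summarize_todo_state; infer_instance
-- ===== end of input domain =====

-- B replaces A's two dependent scans with one pass tracking completed count, first in_progress and first pending (objective: simpler).


-- ===== PORT A =====
-- items.get(task_id, ("", "pending")) : first match in the association list
def pvGetItem (items : List (String × String × String)) (k : String) : String × String :=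
  (PySem.Dict.mk items).getD k ("", "pending")

-- A's first loop: fold over order with state (completed, current)
def pvALoop1 (items : List (String × String × String)) (order : List String)
    (st : Int × Option String) : Int × Option String :=
  order.foldl (fun st task_id =>
    let cs := pvGetItem items task_id
    if cs.2 = "completed" then (st.1 + 1, st.2)
    else if st.2 = none ∧ cs.2 = "in_progress" then (st.1, some cs.1)
    else st) st

-- A's second loop: first pending content (break on first hit)
def pvALoop2 (items : List (String × String × String)) : List String → Option String
  | [] => none
  | task_id :: rest =>
    let cs := pvGetItem items task_id
    if cs.2 = "pending" then some cs.1 else pvALoop2 items rest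

def summarize_todo_state (order : List String) (items : List (String × String × String)) : Int × Int × Option String :=
  if order = [] then (0, 0, none)
  else
    let st := pvALoop1 items order (0, none)
    let current := if st.2 = none then pvALoop2 items order else st.2
    (st.1, (order.length : Int), current)

-- ===== PORT B =====
-- one pass: (completed, first_in_progress, first_pending)
def pvBLoop (items : List (String × String × String)) (order : List String)
    (st : Int × Option String × Option String) : Int × Option String × Option String :=
  order.foldl (fun st task_id =>
    let cs := pvGetItem items task_id
    if cs.2 = "completed" then (st.1 + 1, st.2.1, st.2.2)
    else if cs.2 = "in_progress" then
      (st.1, (if st.2.1 = none then some cs.1 else st.2.1), st.2.2)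
    else if cs.2 = "pending" then
      (st.1, st.2.1, (if st.2.2 = none then some cs.1 else st.2.2))
    else st) st

def summarize_todo_state_alt (order : List String) (items : List (String × String × String)) : Int × Int × Option String :=
  let st := pvBLoop items order (0, none, none)
  let current := match st.2.1 with | some x => some x | none => st.2.2
  (st.1, (order.length : Int), current)

-- ===== PRECONDITION & SPEC =====
def Spec_summarize_todo_state (order : List String) (items : List (String × String × String)) (out : Int × Int × Option String) : Prop := out = summarize_todo_state_alt order items
instance (order : List String) (items : List (String × String × String)) (out : Int × Int × Option String) : Decidable (Spec_summarize_todo_state order items out) := by unfold Spec_summarize_todo_state; infer_instance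

-- ===== CLAIM (what is proved, stated in full; the proofs are below) =====
def Claim_equal_summarize_todo_state : Prop := ∀ (order : List String) (items : List (String × String × String)), Dom_summarize_todo_state order items → Spec_summarize_todo_state order items (summarize_todo_state order items)

-- ===== LEMMAS AND PROOFS =====

-- spec functions for the proof: completed count, first in_progress content
def pvCnt (items : List (String × String × String)) : List String → Int
  | [] => 0
  | t :: rest => (if (pvGetItem items t).2 = "completed" then 1 else 0) + pvCnt items rest

def pvFip (items : List (String × String × String)) : List String → Option String
  | [] => none
  | t :: rest =>
    let cs := pvGetItem items t
    if cs.2 ≠ "completed" ∧ cs.2 = "in_progress" then some cs.1 else pvFip items rest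

theorem pvALoop1_eq (items : List (String × String × String)) (order : List String)
    (c : Int) (cur : Option String) :
    pvALoop1 items order (c, cur) = (c + pvCnt items order, cur.orElse (fun _ => pvFip items order)) := by
  induction order generalizing c cur with
  | nil => simp [pvALoop1, pvCnt, pvFip]
  | cons t rest ih =>
    simp only [pvALoop1, List.foldl_cons] at *
    by_cases hc : (pvGetItem items t).2 = "completed"
    · rw [if_pos (by simp [hc]), ih]
      simp [pvCnt, pvFip, hc]
      omega
    · by_cases hip : (pvGetItem items t).2 = "in_progress"
      · cases cur with
        | none =>
          rw [if_neg (by simp [hc]), if_pos (by simp [hip]), ih]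
          simp [pvCnt, pvFip, hc, hip]
        | some x =>
          rw [if_neg (by simp [hc]), if_neg (by simp)]
          rw [ih]
          simp [pvCnt, pvFip, hc, hip, Option.orElse]
      · rw [if_neg (by simp [hc])]
        have : ¬ (cur = none ∧ (pvGetItem items t).2 = "in_progress") := by simp [hip]
        rw [if_neg this, ih]
        simp [pvCnt, pvFip, hc, hip]

theorem pvBLoop_eq (items : List (String × String × String)) (order : List String)
    (c : Int) (fip fp : Option String) :
    pvBLoop items order (c, fip, fp) =
      (c + pvCnt items order, fip.orElse (fun _ => pvFip items order),
        fp.orElse (fun _ => pvALoop2 items order)) := by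
  induction order generalizing c fip fp with
  | nil => simp [pvBLoop, pvCnt, pvFip, pvALoop2]
  | cons t rest ih =>
    simp only [pvBLoop, List.foldl_cons] at *
    by_cases hc : (pvGetItem items t).2 = "completed"
    · rw [if_pos (by simp [hc])]
      rw [ih]
      simp [pvCnt, pvFip, pvALoop2, hc]
      omega
    · by_cases hip : (pvGetItem items t).2 = "in_progress"
      · rw [if_neg (by simp [hc]), if_pos (by simp [hip])]
        rw [ih]
        have hp : (pvGetItem items t).2 ≠ "pending" := by rw [hip]; decide
        cases fip with
        | none => simp [pvCnt, pvFip, pvALoop2, hc, hip, hp]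
        | some x => simp [pvCnt, pvFip, pvALoop2, hc, hip, hp, Option.orElse]
      · by_cases hp : (pvGetItem items t).2 = "pending"
        · rw [if_neg (by simp [hc]), if_neg (by simp [hip]), if_pos (by simp [hp])]
          rw [ih]
          cases fp with
          | none => simp [pvCnt, pvFip, pvALoop2, hc, hip, hp]
          | some x => simp [pvCnt, pvFip, pvALoop2, hc, hip, hp, Option.orElse]
        · rw [if_neg (by simp [hc]), if_neg (by simp [hip]), if_neg (by simp [hp])]
          rw [ih]
          simp [pvCnt, pvFip, pvALoop2, hc, hip, hp]

-- ===== VERDICT (by name: the statement is the Claim_ definition above) =====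
theorem summarize_todo_state_spec : Claim_equal_summarize_todo_state := by
  intro order items _
  unfold Spec_summarize_todo_state summarize_todo_state summarize_todo_state_alt
  rw [pvALoop1_eq, pvBLoop_eq]
  by_cases h : order = []
  · subst h; simp [pvCnt, pvFip, pvALoop2]
  · rw [if_neg h]
    simp only [Option.orElse]
    cases pvFip items order with
    | none => simp
    | some x => simp
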